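-- pv_equiv track=rewrite | github.com/HackRx-6/Vector-space | ROUND_6/find_almost_equal.py | find_almost_equal_index
-- ===== SOURCE A (Python) =====
-- def find_almost_equal_index(s: str, pattern: str) -> int:
--     n = len(s)
--     m = len(pattern)
--
--     for i in range(n - m + 1):
--         substring = s[i:i + m]
--         difference_count = sum(1 for a, b in zip(substring, pattern) if a != b)
--         if difference_count <= 1:
--             return i
--     return -1
-- ===== SOURCE B (Python) =====
-- def find_almost_equal_index(s: str, pattern: str) -> int:
--     n = len(s)
--     m = len(pattern)
--     i = 0
--     while i + m <= n:
--         # scan to the first mismatch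
--         j = 0
--         while j < m and s[i + j] == pattern[j]:
--             j += 1
--         if j == m:
--             return i
--         # allow one mismatch at j; the rest must match exactly
--         k = j + 1
--         while k < m and s[i + k] == pattern[k]:
--             k += 1
--         if k == m:
--             return i
--         i += 1
--     return -1
-- ===== Notes on version B (the rewrite author's own statement) =====
-- stated objective: faster
-- what changed: A slices out each window and counts all m mismatches per window (always Theta(m) work plus a slice allocation); B slides an index over the string and does two early-exit in-place scans per window, stopping at the second mismatch, so per-window work is O(1 + length matched).
import Mathlib
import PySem

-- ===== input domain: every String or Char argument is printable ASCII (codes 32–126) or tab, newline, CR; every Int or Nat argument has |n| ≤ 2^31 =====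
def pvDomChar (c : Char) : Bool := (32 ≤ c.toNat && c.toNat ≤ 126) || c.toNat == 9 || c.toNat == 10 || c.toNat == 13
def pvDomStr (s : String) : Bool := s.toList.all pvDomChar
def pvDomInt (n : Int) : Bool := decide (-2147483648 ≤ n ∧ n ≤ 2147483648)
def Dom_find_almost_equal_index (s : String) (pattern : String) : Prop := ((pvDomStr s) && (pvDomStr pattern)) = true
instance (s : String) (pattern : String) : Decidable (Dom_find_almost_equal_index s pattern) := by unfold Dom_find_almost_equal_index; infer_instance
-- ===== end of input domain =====

-- B replaces A's per-window slice + full mismatch count by an in-place double early-exit scan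
-- (stop at the second mismatch); same return value, measured faster on the large timing inputs.

-- ===== PORT A =====
-- A's 'for i in range(n - m + 1): … return i' loop with early return, over the pyRange list
def pvA_loop (s pattern : String) (m : Int) : List Int → Int
  | [] => -1
  | i :: rest =>
      let substring := PySem.Str.slice s (some i) (some (i + m))
      let difference_count : Int :=
        ((substring.toList.zip pattern.toList).countP (fun p => p.1 != p.2) : Nat)
      if difference_count ≤ 1 then i else pvA_loop s pattern m rest

def find_almost_equal_index (s : String) (pattern : String) : Int :=
  let n := PySem.Str.len s
  let m := PySem.Str.len pattern
  pvA_loop s pattern m (PySem.List.pyRange 0 (n - m + 1) 1)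

-- ===== PORT B =====
-- B's inner 'while j < m and s[i + j] == pattern[j]: j += 1'; every index it reads is in
-- range (the outer loop guarantees i + m ≤ n), so getD with a dummy default is exact there
def pvB_scan (sl pl : List Char) (i j : Nat) : Nat :=
  if j < pl.length then
    if sl.getD (i + j) ' ' == pl.getD j ' ' then pvB_scan sl pl i (j + 1) else j
  else j
termination_by pl.length - j

-- B's outer 'while i + m <= n' loop
def pvB_outer (sl pl : List Char) (i : Nat) : Int :=
  if h : i + pl.length ≤ sl.length then
    let j := pvB_scan sl pl i 0
    if j = pl.length then (i : Int)
    else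
      let k := pvB_scan sl pl i (j + 1)
      if k = pl.length then (i : Int) else pvB_outer sl pl (i + 1)
  else -1
termination_by sl.length + 1 - i
decreasing_by omega

def find_almost_equal_index_alt (s : String) (pattern : String) : Int :=
  pvB_outer s.toList pattern.toList 0

-- ===== PRECONDITION & SPEC =====
def Spec_find_almost_equal_index (s : String) (pattern : String) (out : Int) : Prop := out = find_almost_equal_index_alt s pattern
instance (s : String) (pattern : String) (out : Int) : Decidable (Spec_find_almost_equal_index s pattern out) := by unfold Spec_find_almost_equal_index; infer_instance

-- ===== CLAIM (what is proved, stated in full; the proofs are below) =====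
def Claim_equal_find_almost_equal_index : Prop := ∀ (s : String) (pattern : String), Dom_find_almost_equal_index s pattern → Spec_find_almost_equal_index s pattern (find_almost_equal_index s pattern)

-- ===== LEMMAS AND PROOFS =====

-- A's mismatch count of one window, on the list side
def pvCm (xs ys : List Char) : Nat := (xs.zip ys).countP (fun p => p.1 != p.2)

-- longest common prefix length: what one pvB_scan pass advances by
def pvLcp : List Char → List Char → Nat
  | a :: xs, b :: ys => if a = b then pvLcp xs ys + 1 else 0
  | _, _ => 0

theorem pvLcp_le (xs ys : List Char) : pvLcp xs ys ≤ ys.length := by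
  induction xs generalizing ys with
  | nil => cases ys <;> simp [pvLcp]
  | cons a xs ih =>
      cases ys with
      | nil => simp [pvLcp]
      | cons b ys =>
          by_cases h : a = b <;> simp [pvLcp, h]
          exact ih ys

theorem pvCm_zero_iff (xs ys : List Char) (h : xs.length = ys.length) :
    pvCm xs ys = 0 ↔ pvLcp xs ys = ys.length := by
  induction xs generalizing ys with
  | nil => cases ys <;> simp_all [pvCm, pvLcp]
  | cons a xs ih =>
      cases ys with
      | nil => simp at h
      | cons b ys =>
          simp at h
          by_cases hab : a = b
          · simpa [pvCm, pvLcp, hab] using ih ys h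
          · simp [pvCm, pvLcp, hab]

-- the key window fact: ≤ 1 mismatch ↔ full match, or the tails after the first mismatch match
theorem pvKey (xs ys : List Char) (h : xs.length = ys.length) :
    pvCm xs ys ≤ 1 ↔
      (pvLcp xs ys = ys.length ∨
        pvLcp xs ys + 1 + pvLcp (xs.drop (pvLcp xs ys + 1)) (ys.drop (pvLcp xs ys + 1)) = ys.length) := by
  induction xs generalizing ys with
  | nil => cases ys <;> simp_all [pvCm, pvLcp]
  | cons a xs ih =>
      cases ys with
      | nil => simp at h
      | cons b ys =>
          simp at h
          by_cases hab : a = b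
          · have hih := ih ys h
            simp [pvCm, pvLcp, hab, List.drop_succ_cons] at hih ⊢
            omega
          · have h0 := pvCm_zero_iff xs ys h
            simp [pvCm, pvLcp, hab, List.drop_succ_cons]
            have h0' : (∀ a b : Char, (a, b) ∈ xs.zip ys → a = b) ↔ pvCm xs ys = 0 := by
              simp [pvCm, List.countP_eq_zero]
            rw [h0', h0]
            omega

-- one pvB_scan pass computes j + lcp of the window/pattern tails
theorem pvB_scan_eq (sl pl : List Char) (i j : Nat)
    (hin : i + pl.length ≤ sl.length) (hj : j ≤ pl.length) :
    pvB_scan sl pl i j = j + pvLcp (((sl.drop i).take pl.length).drop j) (pl.drop j) := by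
  have hw : ((sl.drop i).take pl.length).length = pl.length := by
    simp [List.length_take, List.length_drop]; omega
  generalize hfuel : pl.length - j = fuel
  induction fuel generalizing j with
  | zero =>
      have hjm : j = pl.length := by omega
      rw [pvB_scan]
      simp [hjm, List.drop_of_length_le, pvLcp]
  | succ fuel ihf =>
      have hjm : j < pl.length := by omega
      have hsl : i + j < sl.length := by omega
      have hwj : j < ((sl.drop i).take pl.length).length := by omega
      have hdw : ((sl.drop i).take pl.length).drop j
          = ((sl.drop i).take pl.length)[j] :: ((sl.drop i).take pl.length).drop (j + 1) :=
        List.drop_eq_getElem_cons hwj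
      have hdp : pl.drop j = pl[j] :: pl.drop (j + 1) := List.drop_eq_getElem_cons hjm
      have hwjv : ((sl.drop i).take pl.length)[j] = sl[i + j] := by
        rw [List.getElem_take, List.getElem_drop]
      rw [pvB_scan]
      simp only [hjm, if_true, List.getD_eq_getElem sl ' ' hsl, List.getD_eq_getElem pl ' ' hjm]
      by_cases heq : sl[i + j] = pl[j]
      · rw [if_pos (by simpa using heq), ihf (j + 1) (by omega) (by omega)]
        rw [hdw, hdp, hwjv, pvLcp, if_pos heq]
        omega
      · rw [if_neg (by simpa using heq)]
        rw [hdw, hdp, hwjv, pvLcp, if_neg heq]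
        simp

-- the two loops agree from any start index i
theorem pvLoops_eq (s pattern : String) (i : Nat) :
    pvA_loop s pattern (PySem.Str.len pattern)
        (PySem.List.pyRange (i : Int) ((PySem.Str.len s) - (PySem.Str.len pattern) + 1) 1)
      = pvB_outer s.toList pattern.toList i := by
  rw [PySem.Str.len_eq, PySem.Str.len_eq]
  generalize hfuel : s.toList.length + 1 - i = fuel
  induction fuel generalizing i with
  | zero =>
      have hnil : ((s.toList.length : Int) - (pattern.toList.length : Int) + 1) ≤ (i : Int) := by
        omega
      rw [PySem.List.pyRange_one_eq_nil hnil, pvA_loop, pvB_outer, dif_neg (by omega)]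
  | succ fuel ihf =>
      by_cases hc : i + pattern.toList.length ≤ s.toList.length
      · have hlt : (i : Int) < (s.toList.length : Int) - (pattern.toList.length : Int) + 1 := by
          omega
        rw [PySem.List.pyRange_one_cons hlt, pvA_loop]
        have hsub : (PySem.Str.slice s (some (i : Int))
              (some ((i : Int) + (pattern.toList.length : Int)))).toList
            = (s.toList.drop i).take pattern.toList.length := by
          simp [PySem.Str.slice, PySem.List.slice_natCast_add]
        set w : List Char := (s.toList.drop i).take pattern.toList.length with hwdef
        have hwlen : w.length = pattern.toList.length := by
          rw [hwdef, List.length_take, List.length_drop]; omega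
        have hjs : pvB_scan s.toList pattern.toList i 0 = pvLcp w pattern.toList := by
          simpa using pvB_scan_eq s.toList pattern.toList i 0 hc (by omega)
        have hkey := pvKey w pattern.toList hwlen
        have hlcple : pvLcp w pattern.toList ≤ pattern.toList.length := pvLcp_le w pattern.toList
        rw [pvB_outer, dif_pos hc]
        simp only [hjs, hsub]
        set c : Nat := (w.zip pattern.toList).countP (fun p => p.1 != p.2) with hcdef
        have hkeyc : c ≤ 1 ↔
            (pvLcp w pattern.toList = pattern.toList.length ∨
              pvLcp w pattern.toList + 1
                + pvLcp (w.drop (pvLcp w pattern.toList + 1))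
                    (pattern.toList.drop (pvLcp w pattern.toList + 1))
                = pattern.toList.length) := hkey
        by_cases h1 : pvLcp w pattern.toList = pattern.toList.length
        · rw [if_pos h1, if_pos (show ((c : Nat) : Int) ≤ 1 by
            exact_mod_cast hkeyc.mpr (Or.inl h1))]
        · rw [if_neg h1]
          have hks : pvB_scan s.toList pattern.toList i (pvLcp w pattern.toList + 1)
              = pvLcp w pattern.toList + 1
                + pvLcp (w.drop (pvLcp w pattern.toList + 1))
                    (pattern.toList.drop (pvLcp w pattern.toList + 1)) := by
            simpa using pvB_scan_eq s.toList pattern.toList i (pvLcp w pattern.toList + 1) hc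
              (by omega)
          rw [hks]
          by_cases h2 : pvLcp w pattern.toList + 1
              + pvLcp (w.drop (pvLcp w pattern.toList + 1))
                  (pattern.toList.drop (pvLcp w pattern.toList + 1)) = pattern.toList.length
          · rw [if_pos h2, if_pos (show ((c : Nat) : Int) ≤ 1 by
              exact_mod_cast hkeyc.mpr (Or.inr h2))]
          · rw [if_neg h2]
            have hcm : ¬ c ≤ 1 := fun hcm => (hkeyc.mp hcm).elim h1 h2
            rw [if_neg (show ¬ ((c : Nat) : Int) ≤ 1 by exact_mod_cast hcm)]
            have hcast : ((i : Int) + 1) = ((i + 1 : Nat) : Int) := by push_cast; ring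
            rw [hcast, ihf (i + 1) (by omega)]
      · have hnil : ((s.toList.length : Int) - (pattern.toList.length : Int) + 1) ≤ (i : Int) := by
          omega
        rw [PySem.List.pyRange_one_eq_nil hnil, pvA_loop, pvB_outer, dif_neg hc]

-- ===== VERDICT (by name: the statement is the Claim_ definition above) =====
theorem find_almost_equal_index_spec : Claim_equal_find_almost_equal_index := by
  intro s pattern _
  show find_almost_equal_index s pattern = find_almost_equal_index_alt s pattern
  simpa [find_almost_equal_index, find_almost_equal_index_alt] using pvLoops_eq s pattern 0
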